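-- pv_equiv track=rewrite | github.com/nat-christoforou/Python-Projects | budget-app/budget.py | print_names
-- ===== SOURCE A (Python) =====
-- def print_names(names):
--     """
--     Draw the bar chart of the percentages.
--
--     Parameters
--     ----------
--     names : list
--         The list of names of the categories
--
--     Returns
--     -------
--     output
--         A string that is the x-label of the bar chart
--     """
--     output = ""
--     for i in range(max_length(names)):
--         output += " " * 4
--         for name in names:
--             output += " " + name[i] + " " if i < len(name) else " " * 3
--         output += " \n" if i < (max_length(names) - 1) else ""
--     output += " "
--     return output
--
-- def max_length(names):
--     """Calculate the max length in names."""
--     return max([len(name) for name in names])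
-- ===== SOURCE B (Python) =====
-- def print_names(names):
--     m = max(len(name) for name in names)
--     padded = [name.ljust(m) for name in names]
--     rows = ["    " + "".join(" " + c + " " for c in col) for col in zip(*padded)]
--     return " \n".join(rows) + " "
-- ===== Notes on version B (the rewrite author's own statement) =====
-- stated objective: simpler
-- what changed: Replaces the index-with-bounds-check double loop and string accumulation by pad-to-max (ljust), transpose with zip(*padded), and a single join of per-column rows, eliminating the i<len(name) branch and the i<m-1 separator branch.
import Mathlib
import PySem

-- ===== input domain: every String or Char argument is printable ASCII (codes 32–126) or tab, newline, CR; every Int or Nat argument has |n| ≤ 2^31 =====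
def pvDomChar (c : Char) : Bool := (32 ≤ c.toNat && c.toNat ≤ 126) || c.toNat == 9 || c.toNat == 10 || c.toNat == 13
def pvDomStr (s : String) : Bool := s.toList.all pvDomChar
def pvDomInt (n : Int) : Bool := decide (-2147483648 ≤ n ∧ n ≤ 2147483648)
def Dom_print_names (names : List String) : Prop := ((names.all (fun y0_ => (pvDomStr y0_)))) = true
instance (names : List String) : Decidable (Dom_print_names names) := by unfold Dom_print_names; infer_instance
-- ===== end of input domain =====

-- B replaces A's index-with-bounds-check double loop by pad-to-max, transpose, and one join (objective: simpler).
-- Both ports build the result as a List Char and wrap it with String.ofList at the end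
-- (Lean's own String.append is kernel-opaque; the list concatenation is exact).

-- ===== PORT A =====
-- max([len(name) for name in names]); Python raises ValueError on [] (excluded by Pre_; .getD 0 is unreached there)
def max_length (names : List String) : Int :=
  (PySem.List.max? (names.map (fun name => PySem.Str.len name)) (fun x => x)).getD 0

def print_names (names : List String) : String :=
  let out : List Char :=
    (PySem.List.pyRange 0 (max_length names)).foldl (fun output i =>
      let output := output ++ [' ', ' ', ' ', ' ']            -- output += " " * 4
      let output := names.foldl (fun output name =>
        output ++ (if i < PySem.Str.len name then
            [' '] ++ [(PySem.Str.pyGet? name i).getD ' '] ++ [' ']   -- " " + name[i] + " " (in range: pyGet? is some)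
          else [' ', ' ', ' '])) output                       -- " " * 3
      output ++ (if i < max_length names - 1 then [' ', '\n'] else [])) []
  String.ofList (out ++ [' '])

-- ===== PORT B =====
-- zip(*ls): repeatedly take the heads while every row is nonempty
def pvZipStar (ls : List (List Char)) : List (List Char) :=
  if h : ls ≠ [] ∧ ∀ l ∈ ls, l ≠ [] then
    ls.map (fun l => l.headD ' ') :: pvZipStar (ls.map List.tail)
  else []
termination_by (ls.headD []).length
decreasing_by
  rcases ls with _ | ⟨a, t⟩
  · exact absurd rfl h.1
  · obtain ⟨c, cs, rfl⟩ := List.exists_cons_of_ne_nil (h.2 a (by simp))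
    simp

def print_names_alt (names : List String) : String :=
  let m := (PySem.List.max? (names.map (fun name => PySem.Str.len name)) (fun x => x)).getD 0
  -- name.ljust(m): pad on the right with spaces up to length m
  let padded := names.map (fun name =>
    name.toList ++ List.replicate ((m - PySem.Str.len name).toNat) ' ')
  let rows := (pvZipStar padded).map (fun col =>
    [' ', ' ', ' ', ' '] ++ (col.map (fun c => [' ', c, ' '])).flatten)  -- "    " + "".join(" "+c+" ")
  String.ofList (PySem.Chars.join [' ', '\n'] rows ++ [' '])     -- " \n".join(rows) + " "

-- ===== PRECONDITION & SPEC =====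
-- Pre_ excludes only the empty list, on which A's max() raises ValueError (B's max() raises there too).
def Pre_print_names (names : List String) : Prop := names ≠ []
instance (names : List String) : Decidable (Pre_print_names names) := by unfold Pre_print_names; infer_instance
def pvWitness_print_names : List String := (["ab", ""])

def Spec_print_names (names : List String) (out : String) : Prop := out = print_names_alt names
instance (names : List String) (out : String) : Decidable (Spec_print_names names out) := by unfold Spec_print_names; infer_instance

-- ===== CLAIM (what is proved, stated in full; the proofs are below) =====
def Claim_equal_print_names : Prop := ∀ (names : List String), Dom_print_names names → Pre_print_names names → Spec_print_names names (print_names names)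

-- ===== LEMMAS AND PROOFS =====

-- the common closed form both sides reduce to: one row of the label
def pvRow (L : List (List Char)) (i : ℕ) : List Char :=
  [' ', ' ', ' ', ' '] ++ L.flatMap (fun cs => [' ', cs.getD i ' ', ' '])

lemma pv_foldl_body (step : List Char → ℕ → List Char) (g : ℕ → List Char)
    (h : ∀ o i, step o i = o ++ g i) :
    ∀ (t : List ℕ) (o : List Char), t.foldl step o = o ++ t.flatMap g := by
  intro t
  induction t with
  | nil => simp
  | cons j t ih => intro o; simp [h, ih]

lemma pv_join_cons {sep : List Char} (x : List Char) {l : List (List Char)} (hl : l ≠ []) :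
    PySem.Chars.join sep (x :: l) = x ++ sep ++ PySem.Chars.join sep l := by
  obtain ⟨q, rest, rfl⟩ := List.exists_cons_of_ne_nil hl
  exact PySem.Chars.join_cons_cons sep x q rest

lemma pv_join_append_singleton (sep : List Char) :
    ∀ (rs : List (List Char)) (r : List Char),
      PySem.Chars.join sep (rs ++ [r]) = rs.flatMap (fun x => x ++ sep) ++ r := by
  intro rs
  induction rs with
  | nil => intro r; simp [PySem.Chars.join_singleton]
  | cons x rs ih =>
    intro r
    rw [List.cons_append, pv_join_cons x (by simp), ih]
    simp

lemma pv_flat_sep_eq_join (r : ℕ → List Char) (M : ℕ) :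
    (List.range M).flatMap
        (fun i => r i ++ (if (i : ℤ) < (M : ℤ) - 1 then [' ', '\n'] else [])) =
      PySem.Chars.join [' ', '\n'] ((List.range M).map r) := by
  cases M with
  | zero => simp [PySem.Chars.join, List.intercalate]
  | succ K =>
    rw [List.range_succ, List.map_append, List.map_singleton,
        pv_join_append_singleton, List.flatMap_append, List.flatMap_map]
    congr 1
    · apply List.flatMap_congr
      intro i hi
      have : i < K := List.mem_range.mp hi
      rw [if_pos (by push_cast; omega)]
    · simp only [List.flatMap_cons, List.flatMap_nil, List.append_nil]
      rw [if_neg (by push_cast; omega)]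
      simp

lemma pv_cell_eq (name : String) (i : ℕ) :
    (if (i : ℤ) < PySem.Str.len name then
        [' '] ++ [(PySem.Str.pyGet? name (i : ℤ)).getD ' '] ++ [' ']
      else [' ', ' ', ' ']) = [' ', name.toList.getD i ' ', ' '] := by
  rw [PySem.Str.len_eq, PySem.Str.pyGet?_natCast]
  split_ifs with h
  · simp [List.getD_eq_getElem?_getD]
  · have hge : name.toList.length ≤ i := by omega
    simp [List.getD_eq_getElem?_getD, List.getElem?_eq_none hge]

lemma pv_getD_append_replicate (cs : List Char) (k i : ℕ) :
    (cs ++ List.replicate k ' ').getD i ' ' = cs.getD i ' ' := by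
  by_cases h : i < cs.length
  · simp [List.getD_eq_getElem?_getD, List.getElem?_append_left h]
  · have hge : cs.length ≤ i := by omega
    simp only [List.getD_eq_getElem?_getD, List.getElem?_append_right hge,
      List.getElem?_eq_none hge, List.getElem?_replicate]
    split <;> simp

lemma pv_headD_eq_getD (l : List Char) : l.headD ' ' = l.getD 0 ' ' := by
  cases l <;> rfl

lemma pv_tail_getD (l : List Char) (i : ℕ) : l.tail.getD i ' ' = l.getD (i + 1) ' ' := by
  cases l <;> simp [List.getD_eq_getElem?_getD]

lemma pvZipStar_eq (M : ℕ) :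
    ∀ (ls : List (List Char)), ls ≠ [] → (∀ l ∈ ls, l.length = M) →
      pvZipStar ls = (List.range M).map (fun i => ls.map (fun l => l.getD i ' ')) := by
  induction M with
  | zero =>
    intro ls hne hlen
    rw [pvZipStar, dif_neg]
    · simp
    · intro h
      obtain ⟨a, t, rfl⟩ := List.exists_cons_of_ne_nil hne
      exact (h.2 a (by simp)) (List.eq_nil_of_length_eq_zero (hlen a (by simp)))
  | succ K ih =>
    intro ls hne hlen
    rw [pvZipStar, dif_pos]
    · have htne : ls.map List.tail ≠ [] := by simpa using hne
      have htlen : ∀ l ∈ ls.map List.tail, l.length = K := by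
        intro l hl
        obtain ⟨l', hl', rfl⟩ := List.mem_map.mp hl
        have := hlen l' hl'
        simp [List.length_tail, this]
      rw [ih (ls.map List.tail) htne htlen, List.range_succ_eq_map]
      simp only [List.map_cons, List.map_map]
      congr 1
      · exact List.map_congr_left (fun l _ => pv_headD_eq_getD l)
      · apply List.map_congr_left
        intro i _
        simp only [Function.comp]
        exact List.map_congr_left (fun l _ => pv_tail_getD l i)
    · refine ⟨hne, fun l hl h => ?_⟩
      have := hlen l hl
      rw [h] at this
      simp at this

-- ===== VERDICT (by name: the statement is the Claim_ definition above) =====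
theorem print_names_spec : Claim_equal_print_names := by
  intro names _ hpre
  unfold Spec_print_names
  obtain ⟨v, hmax⟩ : ∃ v, PySem.List.max? (names.map (fun name => PySem.Str.len name)) (fun x => x) = some v := by
    rcases h : PySem.List.max? (names.map (fun name => PySem.Str.len name)) (fun x => x) with _ | v
    · exact absurd (by simpa using (PySem.List.max?_eq_none_iff _ _).mp h) hpre
    · exact ⟨v, rfl⟩
  have hv0 : 0 ≤ v := by
    obtain ⟨n, _, rfl⟩ := List.mem_map.mp (PySem.List.max?_mem hmax)
    rw [PySem.Str.len_eq]
    positivity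
  obtain ⟨M, rfl⟩ : ∃ M : ℕ, v = (M : ℤ) := ⟨v.toNat, (Int.toNat_of_nonneg hv0).symm⟩
  have hle : ∀ name ∈ names, name.toList.length ≤ M := by
    intro name hn
    have := PySem.List.max?_isMax hmax (PySem.Str.len name) (List.mem_map_of_mem hn)
    rw [PySem.Str.len_eq] at this
    exact_mod_cast this
  set L : List (List Char) := names.map String.toList with hL
  -- ===== side A: the fold is the flatMap of rows with the "not last row" separators =====
  have hA : print_names names =
      String.ofList ((List.range M).flatMap
        (fun i => pvRow L i ++ (if (i : ℤ) < (M : ℤ) - 1 then [' ', '\n'] else [])) ++ [' ']) := by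
    unfold print_names max_length
    rw [hmax]
    simp only [Option.getD_some, PySem.List.pyRange_zero_natCast, List.foldl_map]
    congr 2
    rw [pv_foldl_body _
      (fun i => pvRow L i ++ (if (i : ℤ) < (M : ℤ) - 1 then [' ', '\n'] else []))]
    · simp
    · intro o i
      rw [PySem.List.foldl_append_eq_flatMap]
      have hcells : names.flatMap (fun name =>
          (if (i : ℤ) < PySem.Str.len name then
              [' '] ++ [(PySem.Str.pyGet? name (i : ℤ)).getD ' '] ++ [' ']
            else [' ', ' ', ' '])) = L.flatMap (fun cs => [' ', cs.getD i ' ', ' ']) := by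
        rw [hL, List.flatMap_map]
        exact List.flatMap_congr (fun name _ => pv_cell_eq name i)
      rw [hcells, pvRow]
      simp
  -- ===== side B: transpose the padded grid, map the rows, join =====
  have hB : print_names_alt names =
      String.ofList (PySem.Chars.join [' ', '\n'] ((List.range M).map (pvRow L)) ++ [' ']) := by
    unfold print_names_alt
    rw [hmax]
    simp only [Option.getD_some]
    set padded := names.map (fun name =>
      name.toList ++ List.replicate (((M : ℤ) - PySem.Str.len name).toNat) ' ') with hpad
    have hpne : padded ≠ [] := by simpa [hpad] using hpre
    have hplen : ∀ l ∈ padded, l.length = M := by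
      intro l hl
      obtain ⟨n, hn, rfl⟩ := List.mem_map.mp hl
      have := hle n hn
      simp only [List.length_append, List.length_replicate, PySem.Str.len_eq]
      omega
    rw [pvZipStar_eq M padded hpne hplen]
    congr 2
    rw [List.map_map]
    congr 1
    apply List.map_congr_left
    intro i _
    simp only [Function.comp, pvRow, List.map_map]
    congr 1
    rw [← List.flatMap_def, List.flatMap_map, List.flatMap_map]
    apply List.flatMap_congr
    intro name _
    simp only [Function.comp]
    rw [pv_getD_append_replicate]
  rw [hA, hB, pv_flat_sep_eq_join]
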